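-- pv_equiv track=rewrite | github.com/bhavesh677/007 | PythonTest/practice_Test/D2Q4.py | Rsum
-- ===== SOURCE A (Python) =====
-- def Rsum(n):
--     lst = []
--     for l in range(n):
--         lst.append([])
--
--
--     a = 1
--     for i in range (n):
--         for p in range(1,i+2):
--             lst[i].append(a)
--             a += 2
--
--     return sum(lst[n-1]),lst
-- ===== SOURCE B (Python) =====
-- def Rsum(n):
--     lst = [[2 * (i * (i + 1) // 2 + k) + 1 for k in range(i + 1)] for i in range(n)]
--     return sum(lst[n - 1]), lst
-- ===== Notes on version B (the rewrite author's own statement) =====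
-- stated objective: simpler
-- what changed: Replaces A's mutable row list and running odd-counter `a` with a single nested comprehension that computes each element directly from its global position (row offset i*(i+1)//2), so no state is threaded between iterations.
import Mathlib
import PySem

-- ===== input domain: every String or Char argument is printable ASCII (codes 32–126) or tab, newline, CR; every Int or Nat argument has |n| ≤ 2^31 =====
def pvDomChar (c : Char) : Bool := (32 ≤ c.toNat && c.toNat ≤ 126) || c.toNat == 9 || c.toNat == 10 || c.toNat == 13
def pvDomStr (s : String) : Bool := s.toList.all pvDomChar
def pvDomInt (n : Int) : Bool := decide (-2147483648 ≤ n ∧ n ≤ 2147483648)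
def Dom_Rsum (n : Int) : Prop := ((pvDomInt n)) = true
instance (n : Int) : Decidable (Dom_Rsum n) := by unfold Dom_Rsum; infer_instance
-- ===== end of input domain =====

-- B replaces A's running odd-number counter with a direct per-position formula (triangular offset),
-- built as one nested comprehension; objective: simpler (no threaded state).

-- ===== PORT A =====
def Rsum (n : Int) : Int × List (List Int) :=
  -- first loop: lst.append([]) for l in range(n)
  let lst0 : List (List Int) :=
    (PySem.List.pyRange 0 n 1).foldl (fun lst _ => lst ++ [([] : List Int)]) []
  -- a = 1; nested loops appending `a` to lst[i] and stepping a += 2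
  let st :=
    (PySem.List.pyRange 0 n 1).foldl
      (fun (st : List (List Int) × Int) i =>
        (PySem.List.pyRange 1 (i + 2) 1).foldl
          (fun (st : List (List Int) × Int) _ =>
            (PySem.List.pySetD st.1 i (PySem.List.pyGetD st.1 i [] ++ [st.2]), st.2 + 2))
          st)
      (lst0, 1)
  -- return sum(lst[n-1]), lst   (lst[n-1] raises for n ≤ 0: excluded by Pre_)
  ((PySem.List.pyGetD st.1 (n - 1) []).foldl (· + ·) 0, st.1)

-- ===== PORT B =====
def Rsum_alt (n : Int) : Int × List (List Int) :=
  let lst : List (List Int) :=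
    (PySem.List.pyRange 0 n 1).map (fun i =>
      (PySem.List.pyRange 0 (i + 1) 1).map (fun k =>
        2 * (PySem.Int.floordiv (i * (i + 1)) 2 + k) + 1))
  ((PySem.List.pyGetD lst (n - 1) []).foldl (· + ·) 0, lst)

-- ===== PRECONDITION & SPEC =====
-- Pre_ excludes exactly n ≤ 0, where A (and B) raise IndexError on lst[n-1] of the empty list.
def Pre_Rsum (n : Int) : Prop := 1 ≤ n
instance (n : Int) : Decidable (Pre_Rsum n) := by unfold Pre_Rsum; infer_instance
def pvWitness_Rsum : Int := (3)

def Spec_Rsum (n : Int) (out : Int × List (List Int)) : Prop := out = Rsum_alt n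
instance (n : Int) (out : Int × List (List Int)) : Decidable (Spec_Rsum n out) := by unfold Spec_Rsum; infer_instance

-- ===== CLAIM (what is proved, stated in full; the proofs are below) =====
def Claim_equal_Rsum : Prop := ∀ (n : Int), Dom_Rsum n → Pre_Rsum n → Spec_Rsum n (Rsum n)

-- ===== LEMMAS AND PROOFS =====

-- the row A builds at index i, written positionally (`a` at the start of row i is i*(i+1)+1)
def pvRow (i : Nat) : List Int :=
  (List.range (i + 1)).map (fun k : Nat => (i * (i + 1) : Int) + 2 * (k : Int) + 1)

-- A's inner loop body, iterated c times: appends a, a+2, …, a+2(c-1) to row i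
lemma pvInner_iter (c : Nat) (i : Nat) :
    ∀ (lst : List (List Int)) (a : Int) (hi : i < lst.length),
    (fun st : List (List Int) × Int =>
        (PySem.List.pySetD st.1 (i : Int) (PySem.List.pyGetD st.1 (i : Int) [] ++ [st.2]), st.2 + 2))^[c] (lst, a)
    = (lst.set i (lst[i]'hi ++ (List.range c).map (fun k : Nat => a + 2 * (k : Int))),
       a + 2 * (c : Int)) := by
  induction c with
  | zero => intro lst a hi; simp [List.set_getElem_self]
  | succ c ih =>
    intro lst a hi
    rw [Function.iterate_succ_apply]
    show (fun st : List (List Int) × Int =>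
        (PySem.List.pySetD st.1 (i : Int) (PySem.List.pyGetD st.1 (i : Int) [] ++ [st.2]), st.2 + 2))^[c]
        (PySem.List.pySetD lst (i : Int) (PySem.List.pyGetD lst (i : Int) [] ++ [a]), a + 2) = _
    rw [show PySem.List.pySetD lst (i : Int) (PySem.List.pyGetD lst (i : Int) [] ++ [a])
          = lst.set i (lst.getD i [] ++ [a]) from by
          simp [List.getD, hi],
        ih (lst.set i (lst.getD i [] ++ [a])) (a + 2) (by simpa using hi)]
    have hget : (lst.set i (lst.getD i [] ++ [a]))[i]'(by simpa using hi) = lst[i]'hi ++ [a] := by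
      simp [List.getD, hi]
    rw [hget, List.set_set]
    simp only [Prod.mk.injEq]
    refine ⟨?_, by push_cast; ring⟩
    congr 1
    rw [List.append_assoc]
    congr 1
    rw [List.range_succ_eq_map, List.map_cons, List.map_map]
    simp only [List.singleton_append, Nat.cast_zero, mul_zero, add_zero]
    congr 1
    apply List.map_congr_left
    intro k _
    simp only [Function.comp_apply]
    push_cast; ring

-- A's outer loop over range(m), starting from M empty rows, fills the first m rows
lemma pvOuter (M : Nat) (m : Nat) (hm : m ≤ M) :
    (PySem.List.pyRange 0 (m : Int) 1).foldl
      (fun (st : List (List Int) × Int) i =>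
        (PySem.List.pyRange 1 (i + 2) 1).foldl
          (fun (st : List (List Int) × Int) _ =>
            (PySem.List.pySetD st.1 i (PySem.List.pyGetD st.1 i [] ++ [st.2]), st.2 + 2))
          st)
      (List.replicate M ([] : List Int), 1)
    = ((List.range m).map pvRow ++ List.replicate (M - m) ([] : List Int),
       (m * (m + 1) : Int) + 1) := by
  induction m with
  | zero => simp [PySem.List.pyRange_one_eq_nil]
  | succ m ih =>
    rw [show ((m + 1 : Nat) : Int) = (m : Int) + 1 by push_cast; ring,
        PySem.List.pyRange_one_succ_right (by positivity), List.foldl_append,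
        ih (by omega)]
    simp only [List.foldl_cons, List.foldl_nil]
    rw [List.foldl_const]
    have hlen : (PySem.List.pyRange 1 ((m : Int) + 2) 1).length = m + 1 := by
      rw [PySem.List.length_pyRange_one]; omega
    rw [hlen]
    rw [show List.replicate (M - m) ([] : List Int) = ([] : List Int) :: List.replicate (M - m - 1) [] by
      rw [show M - m = (M - m - 1) + 1 from by omega]; simp [List.replicate_succ]]
    have hi : m < ((List.range m).map pvRow ++ ([] : List Int) :: List.replicate (M - m - 1) ([] : List Int)).length := by
      simp
    rw [pvInner_iter (m + 1) m _ _ hi]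
    have hgm : ((List.range m).map pvRow ++ ([] : List Int) :: List.replicate (M - m - 1) ([] : List Int))[m]'hi = ([] : List Int) :=
      List.getElem_of_append rfl (by simp)
    rw [hgm, List.nil_append]
    simp only [Prod.mk.injEq]
    refine ⟨?_, by push_cast; ring⟩
    rw [List.set_append_right m _ (by simp)]
    simp only [List.length_map, List.length_range, Nat.sub_self, List.set_cons_zero]
    rw [show M - (m + 1) = M - m - 1 from by omega]
    conv_rhs => rw [List.range_succ, List.map_append, List.append_assoc]
    simp only [List.map_cons, List.map_nil, List.singleton_append]
    congr 2
    unfold pvRow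
    apply List.map_congr_left
    intro k _
    ring

-- B's row formula equals pvRow on natural i
lemma pvRowB (i : Nat) :
    (PySem.List.pyRange 0 ((i : Int) + 1) 1).map (fun k =>
        2 * (PySem.Int.floordiv ((i : Int) * ((i : Int) + 1)) 2 + k) + 1) = pvRow i := by
  rw [show ((i : Int) + 1) = ((i + 1 : Nat) : Int) by push_cast; ring,
      PySem.List.pyRange_zero_natCast, List.map_map]
  unfold pvRow
  apply List.map_congr_left
  intro k _
  simp only [Function.comp_apply]
  have h2 : 2 * (i * (i + 1) / 2) = i * (i + 1) := by
    obtain ⟨r, hr⟩ := Nat.even_mul_succ_self i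
    omega
  have hfd : PySem.Int.floordiv ((i : Int) * (((i + 1 : Nat)) : Int)) 2 = ((i * (i + 1) / 2 : Nat) : Int) := by
    rw [show (i : Int) * (((i + 1 : Nat)) : Int) = ((i * (i + 1) : Nat) : Int) by push_cast; ring]
    rw [show (2 : Int) = ((2 : Nat) : Int) from rfl]
    exact PySem.Int.floordiv_natCast (i * (i + 1)) 2
  rw [hfd, show (i : Int) * ((i : Int) + 1) = ((i * (i + 1) : Nat) : Int) from by push_cast; ring]
  omega

-- the two nested structures agree for every n
lemma pvLst_eq (n : Int) :
    ((PySem.List.pyRange 0 n 1).foldl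
      (fun (st : List (List Int) × Int) i =>
        (PySem.List.pyRange 1 (i + 2) 1).foldl
          (fun (st : List (List Int) × Int) _ =>
            (PySem.List.pySetD st.1 i (PySem.List.pyGetD st.1 i [] ++ [st.2]), st.2 + 2))
          st)
      ((PySem.List.pyRange 0 n 1).foldl (fun lst _ => lst ++ [([] : List Int)]) [], 1)).1
    = (PySem.List.pyRange 0 n 1).map (fun i =>
        (PySem.List.pyRange 0 (i + 1) 1).map (fun k =>
          2 * (PySem.Int.floordiv (i * (i + 1)) 2 + k) + 1)) := by
  by_cases hn : n ≤ 0
  · rw [PySem.List.pyRange_one_eq_nil hn]; rfl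
  obtain ⟨M, rfl⟩ : ∃ M : Nat, n = (M : Int) := ⟨n.toNat, by omega⟩
  have hinit : (PySem.List.pyRange 0 (M : Int) 1).foldl
      (fun lst _ => lst ++ [([] : List Int)]) [] = List.replicate M ([] : List Int) := by
    rw [PySem.List.foldl_append_singleton_eq_map (fun _ => ([] : List Int)) _ []]
    simp [PySem.List.pyRange_zero_natCast, List.map_map, Function.comp_def, List.map_const']
  rw [hinit, pvOuter M M (le_refl _)]
  simp only [Nat.sub_self, List.replicate_zero, List.append_nil]
  rw [PySem.List.pyRange_zero_natCast, List.map_map]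
  apply List.map_congr_left
  intro i _
  simpa using (pvRowB i).symm

-- ===== VERDICT (by name: the statement is the Claim_ definition above) =====
theorem Rsum_spec : Claim_equal_Rsum := by
  intro n _ _
  unfold Spec_Rsum Rsum Rsum_alt
  simp only []
  rw [pvLst_eq n]
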